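-- pv_equiv track=rewrite | github.com/FlagOpen/FlagData | flagdata/quality_assessment/Bert/utils/encode.py | find_end_token
-- ===== SOURCE A (Python) =====
-- def find_end_token(tokens, start_idx, max_len):
--     if start_idx + max_len >= len(tokens) - 1:
--         return -1
--     else:
--         for i in range(start_idx + max_len - 1, start_idx, -1):
--
--             if tokens[i] == "\n":
--                 return i
--             elif tokens[i] in ['.', '?', '!', '。', '！', '？']:
--                 return i + 1
--
--     return -1
-- ===== SOURCE B (Python) =====
-- def find_end_token(tokens, start_idx, max_len):
--     if start_idx + max_len >= len(tokens) - 1: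
--         return -1
--     hits = [i if tokens[i] == "\n" else i + 1
--             for i in range(start_idx + 1, start_idx + max_len)
--             if tokens[i] == "\n" or tokens[i] in ('.', '?', '!', '\u3002', '\uff01', '\uff1f')]
--     return max(hits, default=-1)
-- ===== Notes on version B (the rewrite author's own statement) =====
-- stated objective: alternative
-- what changed: Replaces A's backward scan with early returns by a declarative two-stage computation: a comprehension collects the candidate result (i or i+1) of every boundary token in the window, and max(hits, default=-1) picks the winner; correct because candidates are monotone in the index, so the maximum is exactly the highest-index boundary A finds first.
-- outside the precondition, e.g. on find_end_token(['\n', 'x', 'y'], -5, 3): A returns -3, B raises IndexError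
import Mathlib
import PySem

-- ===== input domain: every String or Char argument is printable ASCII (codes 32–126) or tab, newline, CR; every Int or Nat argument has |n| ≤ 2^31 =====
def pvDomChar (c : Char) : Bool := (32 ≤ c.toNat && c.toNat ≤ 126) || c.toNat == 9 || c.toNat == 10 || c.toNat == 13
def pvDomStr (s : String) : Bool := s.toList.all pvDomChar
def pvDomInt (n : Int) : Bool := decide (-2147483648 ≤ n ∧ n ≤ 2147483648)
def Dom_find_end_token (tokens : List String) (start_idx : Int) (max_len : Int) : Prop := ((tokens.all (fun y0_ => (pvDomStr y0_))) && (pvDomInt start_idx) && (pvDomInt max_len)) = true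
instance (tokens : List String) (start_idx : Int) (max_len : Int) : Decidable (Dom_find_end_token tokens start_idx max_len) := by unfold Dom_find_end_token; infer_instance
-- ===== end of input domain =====

-- B replaces A's backward early-return scan by a comprehension of all boundary candidates plus max(.., default=-1) (alternative decomposition, same cost).


-- ===== PORT A =====
-- A's backward loop 'for i in range(start_idx+max_len-1, start_idx, -1)': fuel n counts the
-- remaining iterations, the current index is start_idx + n; first match returns immediately.
def findA_loop (tokens : List String) (start_idx : Int) : Nat → Int
  | 0 => -1
  | n+1 =>
    let i : Int := start_idx + ((n : Int) + 1)
    let t := PySem.List.pyGetD tokens i ""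
    if t = "\n" then i
    else if t ∈ ([".", "?", "!", "。", "！", "？"] : List String) then i + 1
    else findA_loop tokens start_idx n

def find_end_token (tokens : List String) (start_idx : Int) (max_len : Int) : Int :=
  if start_idx + max_len ≥ (tokens.length : Int) - 1 then -1
  else findA_loop tokens start_idx (max_len - 1).toNat

-- ===== PORT B =====
-- the comprehension's per-index contribution: the candidate result of a boundary token, or nothing
def candB (tokens : List String) (i : Int) : Option Int :=
  if PySem.List.pyGetD tokens i "" = "\n" then some i
  else if PySem.List.pyGetD tokens i "" = "." ∨ PySem.List.pyGetD tokens i "" = "?" ∨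
      PySem.List.pyGetD tokens i "" = "!" ∨ PySem.List.pyGetD tokens i "" = "。" ∨
      PySem.List.pyGetD tokens i "" = "！" ∨ PySem.List.pyGetD tokens i "" = "？" then some (i + 1)
  else none

def find_end_token_alt (tokens : List String) (start_idx : Int) (max_len : Int) : Int :=
  if start_idx + max_len ≥ (tokens.length : Int) - 1 then -1
  else
    let hits := (PySem.List.pyRange (start_idx + 1) (start_idx + max_len) 1).filterMap (candB tokens)
    match PySem.List.max? hits (fun x => x) with
    | none => -1
    | some v => v

-- ===== PRECONDITION & SPEC =====
-- Pre_ excludes the inputs where the non-guarded window reaches below index -len(tokens):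
-- there B (which touches every window index) always raises IndexError, and A either raises
-- IndexError or returns a value found by negative-index wraparound before reaching the bad index.
def Pre_find_end_token (tokens : List String) (start_idx : Int) (max_len : Int) : Prop :=
  start_idx + max_len ≥ (tokens.length : Int) - 1 ∨ max_len ≤ 1 ∨ -(tokens.length : Int) ≤ start_idx + 1
instance (tokens : List String) (start_idx : Int) (max_len : Int) : Decidable (Pre_find_end_token tokens start_idx max_len) := by unfold Pre_find_end_token; infer_instance

def pvWitness_find_end_token : List String × Int × Int := (["a", ".", "b", "c", "d"], 0, 3)

def Spec_find_end_token (tokens : List String) (start_idx : Int) (max_len : Int) (out : Int) : Prop := out = find_end_token_alt tokens start_idx max_len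
instance (tokens : List String) (start_idx : Int) (max_len : Int) (out : Int) : Decidable (Spec_find_end_token tokens start_idx max_len out) := by unfold Spec_find_end_token; infer_instance

-- ===== CLAIM (what is proved, stated in full; the proofs are below) =====
def Claim_equal_find_end_token : Prop := ∀ (tokens : List String) (start_idx : Int) (max_len : Int), Dom_find_end_token tokens start_idx max_len → Pre_find_end_token tokens start_idx max_len → Spec_find_end_token tokens start_idx max_len (find_end_token tokens start_idx max_len)

-- ===== LEMMAS AND PROOFS =====

-- B's post-loop 'max(hits, default=-1)'
def resB (hits : List Int) : Int :=
  match PySem.List.max? hits (fun x => x) with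
  | none => -1
  | some v => v

theorem find_end_token_alt_eq_resB (tokens : List String) (s m : Int) :
    find_end_token_alt tokens s m
      = if s + m ≥ (tokens.length : Int) - 1 then -1
        else resB ((PySem.List.pyRange (s + 1) (s + m) 1).filterMap (candB tokens)) := rfl

theorem foldl_max_le {t : List Int} {h c : Int} (hh : h ≤ c) (ht : ∀ y ∈ t, y ≤ c) :
    t.foldl max h ≤ c := by
  induction t generalizing h with
  | nil => exact hh
  | cons x xs ih =>
    simp only [List.foldl_cons]
    exact ih (max_le hh (ht x (by simp))) (fun y hy => ht y (by simp [hy]))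

-- appending a candidate that dominates every earlier one makes it the maximum
theorem resB_append_max {hits : List Int} {c : Int} (hb : ∀ y ∈ hits, y ≤ c) :
    resB (hits ++ [c]) = c := by
  cases hits with
  | nil => simp [resB, PySem.List.max?_id_cons]
  | cons h t =>
    have hfold : (t ++ [c]).foldl max h = c := by
      rw [List.foldl_append]
      simp only [List.foldl_cons, List.foldl_nil]
      exact max_eq_right (foldl_max_le (hb h (by simp)) (fun y hy => hb y (by simp [hy])))
    simp [resB, PySem.List.max?_id_cons, hfold]

-- every candidate from the window [a, b) is at most b
theorem hits_le (tokens : List String) (a b : Int) :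
    ∀ y ∈ (PySem.List.pyRange a b 1).filterMap (candB tokens), y ≤ b := by
  intro y hy
  rcases List.mem_filterMap.mp hy with ⟨i, hi, hc⟩
  have hib : i < b := ((PySem.List.mem_pyRange_one).mp hi).2
  unfold candB at hc
  split_ifs at hc <;> simp_all <;> omega

-- A's downward first-match scan of n indices equals B's candidate-maximum over the same window
theorem findA_loop_eq_resB (tokens : List String) (s : Int) (n : Nat) :
    findA_loop tokens s n
      = resB ((PySem.List.pyRange (s + 1) (s + 1 + n) 1).filterMap (candB tokens)) := by
  induction n with
  | zero =>
    rw [PySem.List.pyRange_one_eq_nil (by omega)]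
    rfl
  | succ n ih =>
    have hsplit : PySem.List.pyRange (s + 1) (s + 1 + (n + 1 : Nat)) 1
        = PySem.List.pyRange (s + 1) (s + 1 + n) 1 ++ [s + ((n : Int) + 1)] := by
      have h1 : (s + 1 + ((n : Int) + 1)) = (s + ((n : Int) + 1)) + 1 := by ring
      have h2 : s + ((n : Int) + 1) = s + 1 + n := by ring
      push_cast
      rw [h1, PySem.List.pyRange_one_succ_right (by omega), h2]
    rw [hsplit, List.filterMap_append]
    have hb := hits_le tokens (s + 1) (s + 1 + n)
    simp only [findA_loop]
    by_cases h1 : PySem.List.pyGetD tokens (s + ((n : Int) + 1)) "" = "\n"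
    · have hone : List.filterMap (candB tokens) [s + ((n : Int) + 1)]
          = [s + ((n : Int) + 1)] := by simp [candB, h1]
      rw [if_pos h1, hone]
      exact (resB_append_max (fun y hy => by have := hb y hy; omega)).symm
    · by_cases h2 : PySem.List.pyGetD tokens (s + ((n : Int) + 1)) "" = "." ∨
          PySem.List.pyGetD tokens (s + ((n : Int) + 1)) "" = "?" ∨
          PySem.List.pyGetD tokens (s + ((n : Int) + 1)) "" = "!" ∨
          PySem.List.pyGetD tokens (s + ((n : Int) + 1)) "" = "。" ∨
          PySem.List.pyGetD tokens (s + ((n : Int) + 1)) "" = "！" ∨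
          PySem.List.pyGetD tokens (s + ((n : Int) + 1)) "" = "？"
      · have hmem : PySem.List.pyGetD tokens (s + ((n : Int) + 1)) ""
            ∈ ([".", "?", "!", "。", "！", "？"] : List String) := by
          simp only [List.mem_cons, List.not_mem_nil, or_false]; tauto
        have hone : List.filterMap (candB tokens) [s + ((n : Int) + 1)]
            = [s + ((n : Int) + 1) + 1] := by simp [candB, h1, h2]
        rw [if_neg h1, if_pos hmem, hone]
        exact (resB_append_max (fun y hy => by have := hb y hy; omega)).symm
      · have hmem : PySem.List.pyGetD tokens (s + ((n : Int) + 1)) ""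
            ∉ ([".", "?", "!", "。", "！", "？"] : List String) := by
          simp only [List.mem_cons, List.not_mem_nil, or_false]; tauto
        have hone : List.filterMap (candB tokens) [s + ((n : Int) + 1)]
            = [] := by simp [candB, h1, h2]
        rw [if_neg h1, if_neg hmem, hone, List.append_nil]
        exact ih

-- ===== VERDICT (by name: the statement is the Claim_ definition above) =====
theorem find_end_token_spec : Claim_equal_find_end_token := by
  intro tokens s m _ _
  unfold Spec_find_end_token
  rw [find_end_token_alt_eq_resB]
  unfold find_end_token
  split_ifs with h
  · rfl
  · rw [findA_loop_eq_resB]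
    by_cases hm : 1 ≤ m
    · have : s + 1 + ((m - 1).toNat : Int) = s + m := by omega
      rw [this]
    · have h1 : (m - 1).toNat = 0 := by omega
      rw [h1]
      rw [PySem.List.pyRange_one_eq_nil (by omega), PySem.List.pyRange_one_eq_nil (by omega)]
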